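-- pv_equiv track=rewrite | github.com/kelrus/UpdateBot | BackBot/UidHandler.py | __SplittingMessageIntoASC
-- ===== SOURCE A (Python) =====
-- def __StepGenUid(num: int):
--     if num > 16:
--         return int(num / 16) + 1
--     else:
--         return 1
--
-- def __SplittingMessageIntoASC(message):
--
--     step = __StepGenUid(len(message))
--
--     newMessageASC = []
--     currentNum = 0
--     while currentNum + step <= len(message):
--         newSymbolMessageASC = 0
--         num = 0
--         while num < step:
--             newSymbolMessageASC += ord(message[currentNum  + num])
--             num += 1
--         currentNum += int(step)
--         newMessageASC.append(newSymbolMessageASC)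
--
--     return newMessageASC
-- ===== SOURCE B (Python) =====
-- def __SplittingMessageIntoASC(message):
--     n = len(message)
--     step = n // 16 + 1 if n > 16 else 1
--     result = []
--     acc = 0
--     for i, ch in enumerate(message):
--         acc += ord(ch)
--         if (i + 1) % step == 0:
--             result.append(acc)
--             acc = 0
--     return result
-- ===== Notes on version B (the rewrite author's own statement) =====
-- stated objective: simpler
-- what changed: Replaced the nested while loops with explicit index arithmetic by a single flat enumerate pass that keeps a running accumulator and emits it every time a chunk of `step` characters completes (the trailing partial chunk never triggers an emit).
import Mathlib
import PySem

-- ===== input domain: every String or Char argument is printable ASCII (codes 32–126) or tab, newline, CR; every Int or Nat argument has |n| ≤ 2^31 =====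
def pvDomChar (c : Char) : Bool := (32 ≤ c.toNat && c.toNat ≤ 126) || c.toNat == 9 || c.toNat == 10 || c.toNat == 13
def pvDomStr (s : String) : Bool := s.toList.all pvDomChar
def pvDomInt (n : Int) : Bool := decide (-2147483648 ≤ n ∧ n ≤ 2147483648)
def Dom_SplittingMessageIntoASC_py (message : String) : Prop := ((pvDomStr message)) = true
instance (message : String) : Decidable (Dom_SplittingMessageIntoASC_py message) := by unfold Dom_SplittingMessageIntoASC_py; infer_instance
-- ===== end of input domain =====

-- B replaces A's nested while loops (chunk index + inner summation loop) with one flat pass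
-- over enumerate(message) keeping a running accumulator, emitted at each completed chunk (simpler).


-- ===== PORT A =====
-- int(num/16): num is a string length (nonnegative; > 16 in this branch), where Python's
-- truncating int(num/16) coincides exactly with floor division num // 16.
def StepGenUid_py (num : Int) : Int :=
  if num > 16 then PySem.Int.floordiv num 16 + 1 else 1

-- the step produced by __StepGenUid is always ≥ 1 (needed for the outer while loop's termination)
theorem one_le_StepGenUid_py (num : Int) : 1 ≤ StepGenUid_py num := by
  unfold StepGenUid_py
  split
  · have h := (PySem.Int.le_floordiv_iff_mul_le (a := num) (b := 16) (q := 0) (by omega)).mpr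
      (by omega)
    omega
  · omega

-- inner loop: while num < step: newSymbolMessageASC += ord(message[currentNum + num]); num += 1
def pyAInner (chars : List Char) (currentNum step num acc : Int) : Int :=
  if h : num < step then
    pyAInner chars currentNum step (num + 1)
      (acc + ((PySem.List.pyGet? chars (currentNum + num)).map (fun c => (c.toNat : Int))).getD 0)
  else acc
termination_by (step - num).toNat
decreasing_by omega

-- outer loop: while currentNum + step <= len(message): … ; currentNum += step; append
def pyAOuter (chars : List Char) (step : Int) (hstep : 1 ≤ step) (currentNum : Int)
    (out : List Int) : List Int :=
  if h : currentNum + step ≤ (chars.length : Int) then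
    pyAOuter chars step hstep (currentNum + step)
      (out ++ [pyAInner chars currentNum step 0 0])
  else out
termination_by ((chars.length : Int) - currentNum).toNat
decreasing_by omega

def SplittingMessageIntoASC_py (message : String) : List Int :=
  pyAOuter message.toList (StepGenUid_py (PySem.Str.len message))
    (one_le_StepGenUid_py _) 0 []

-- ===== PORT B =====
-- for i, ch in enumerate(message): acc += ord(ch); if (i+1) % step == 0: emit acc; acc = 0
def altLoop (step : Int) (i : Nat) (acc : Int) : List Char → List Int
  | [] => []
  | c :: rest =>
    let acc' := acc + (c.toNat : Int)
    if PySem.Int.mod ((i : Int) + 1) step = 0 then acc' :: altLoop step (i + 1) 0 rest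
    else altLoop step (i + 1) acc' rest

def SplittingMessageIntoASC_py_alt (message : String) : List Int :=
  let n : Int := PySem.Str.len message
  let step : Int := if n > 16 then PySem.Int.floordiv n 16 + 1 else 1
  altLoop step 0 0 message.toList

-- ===== PRECONDITION & SPEC =====
def Spec_SplittingMessageIntoASC_py (message : String) (out : List Int) : Prop := out = SplittingMessageIntoASC_py_alt message
instance (message : String) (out : List Int) : Decidable (Spec_SplittingMessageIntoASC_py message out) := by unfold Spec_SplittingMessageIntoASC_py; infer_instance

-- ===== CLAIM (what is proved, stated in full; the proofs are below) =====
def Claim_equal_SplittingMessageIntoASC_py : Prop := ∀ (message : String), Dom_SplittingMessageIntoASC_py message → Spec_SplittingMessageIntoASC_py message (SplittingMessageIntoASC_py message)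

-- ===== LEMMAS AND PROOFS =====

-- the ord values of a character list
def ords (l : List Char) : List Int := l.map (fun c => (c.toNat : Int))

-- sums of the successive complete chunks of size s (trailing partial chunk dropped)
def chunkSums (s : Nat) (l : List Int) : List Int :=
  if h : 0 < s ∧ s ≤ l.length then (l.take s).sum :: chunkSums s (l.drop s) else []
termination_by l.length
decreasing_by simp; omega

theorem ords_length (l : List Char) : (ords l).length = l.length := by simp [ords]

-- B: no emission happens while fewer than a full chunk of characters remains
theorem altLoop_tail (s : Int) (t : Nat) (hst : s = (t : Int)) :
    ∀ (chars : List Char) (i : Nat) (acc : Int), i % t + chars.length < t →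
      altLoop s i acc chars = [] := by
  intro chars
  induction chars with
  | nil => intro i acc _; simp [altLoop]
  | cons c rest ih =>
    intro i acc hlt
    have hlen : (c :: rest).length = rest.length + 1 := by simp
    rw [hlen] at hlt
    have hmod : (i + 1) % t = i % t + 1 := by
      have h : i + 1 = (i % t + 1) + t * (i / t) := by
        have hd := Nat.div_add_mod i t; omega
      rw [h, Nat.add_mul_mod_self_left]
      exact Nat.mod_eq_of_lt (by omega)
    have hcond : PySem.Int.mod ((i : Int) + 1) s ≠ 0 := by
      rw [hst, show ((i : Int) + 1) = ((i + 1 : Nat) : Int) by push_cast; ring,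
        PySem.Int.mod_natCast, hmod]
      intro hcon
      have : i % t + 1 = 0 := by exact_mod_cast hcon
      omega
    rw [show altLoop s i acc (c :: rest) =
        (if PySem.Int.mod ((i : Int) + 1) s = 0
          then (acc + (c.toNat : Int)) :: altLoop s (i + 1) 0 rest
          else altLoop s (i + 1) (acc + (c.toNat : Int)) rest) from rfl,
      if_neg hcond]
    apply ih
    rw [hmod]; omega

-- B: consuming one complete chunk emits exactly its accumulated sum
theorem altLoop_consume (s : Int) (t : Nat) (hst : s = (t : Int)) :
    ∀ (pre : List Char) (i : Nat) (acc : Int) (rest : List Char),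
      pre.length ≠ 0 → pre.length ≤ t → (i + pre.length) % t = 0 →
      altLoop s i acc (pre ++ rest) =
        (acc + (ords pre).sum) :: altLoop s (i + pre.length) 0 rest := by
  intro pre
  induction pre with
  | nil => intro i acc rest h0 _ _; simp at h0
  | cons c pre' ih =>
    intro i acc rest _ hle hmod
    have ht1 : 1 ≤ t := by
      rcases Nat.eq_zero_or_pos t with h | h
      · subst h; simp at hle
      · omega
    cases pre' with
    | nil =>
      have hm1 : (i + 1) % t = 0 := by simpa using hmod
      have hcond : PySem.Int.mod ((i : Int) + 1) s = 0 := by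
        rw [hst, show ((i : Int) + 1) = ((i + 1 : Nat) : Int) by push_cast; ring,
          PySem.Int.mod_natCast, hm1]
        rfl
      simp [altLoop, hcond, ords]
    | cons c' pre'' =>
      have hL1 : 1 ≤ (c' :: pre'').length := by simp
      have hlen : (c :: c' :: pre'').length = (c' :: pre'').length + 1 := by simp
      have hmod' : (i + 1 + (c' :: pre'').length) % t = 0 := by
        rw [show i + 1 + (c' :: pre'').length = i + (c :: c' :: pre'').length by
          rw [hlen]; omega]
        exact hmod
      have hcond : PySem.Int.mod ((i : Int) + 1) s ≠ 0 := by
        rw [hst, show ((i : Int) + 1) = ((i + 1 : Nat) : Int) by push_cast; ring,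
          PySem.Int.mod_natCast]
        intro hcon
        have h1 : t ∣ (i + 1) := Nat.dvd_of_mod_eq_zero (by exact_mod_cast hcon)
        have h2 : t ∣ (i + 1 + (c' :: pre'').length) := Nat.dvd_of_mod_eq_zero hmod'
        have h3 : t ∣ (c' :: pre'').length := (Nat.dvd_add_right h1).mp h2
        have h4 := Nat.le_of_dvd (by omega) h3
        rw [hlen] at hle
        omega
      rw [show (c :: c' :: pre'') ++ rest = c :: ((c' :: pre'') ++ rest) from rfl]
      rw [show altLoop s i acc (c :: ((c' :: pre'') ++ rest)) =
          (if PySem.Int.mod ((i : Int) + 1) s = 0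
            then (acc + (c.toNat : Int)) :: altLoop s (i + 1) 0 ((c' :: pre'') ++ rest)
            else altLoop s (i + 1) (acc + (c.toNat : Int)) ((c' :: pre'') ++ rest)) from rfl,
        if_neg hcond]
      rw [ih (i + 1) (acc + (c.toNat : Int)) rest (by omega) (by rw [hlen] at hle; omega)
        hmod']
      congr 1
      · simp [ords]; ring
      · rw [show i + 1 + (c' :: pre'').length = i + (c :: c' :: pre'').length by
          rw [hlen]; omega]

-- B computes the chunk sums
theorem altLoop_eq_chunkSums (s : Int) (t : Nat) (hst : s = (t : Int)) (ht : 1 ≤ t) :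
    ∀ (n : Nat) (chars : List Char), chars.length = n → ∀ (i : Nat), i % t = 0 →
      altLoop s i 0 chars = chunkSums t (ords chars) := by
  intro n
  induction n using Nat.strong_induction_on with
  | _ n IH =>
    intro chars hlen i hi
    by_cases hb : t ≤ chars.length
    · have htake : (chars.take t).length = t := by simp; omega
      conv_lhs => rw [← List.take_append_drop t chars]
      rw [altLoop_consume s t hst (chars.take t) i 0 (chars.drop t)
        (by omega) (by omega) (by rw [htake, Nat.add_mod_right, hi])]
      rw [chunkSums, dif_pos (by rw [ords_length]; exact ⟨ht, hb⟩)]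
      congr 1
      · simp [ords, List.map_take]
      · rw [htake]
        rw [IH (chars.length - t) (by omega) (chars.drop t) (by simp) (i + t)
          (by rw [Nat.add_mod_right, hi])]
        congr 1
        simp [ords, List.map_drop]
    · rw [altLoop_tail s t hst chars i 0 (by omega)]
      rw [chunkSums, dif_neg (by rw [ords_length]; omega)]

-- A's inner loop sums the ord values of the current chunk
theorem pyAInner_eq (chars : List Char) (cn step : Int) (hcn : 0 ≤ cn)
    (hle : cn + step ≤ (chars.length : Int)) :
    ∀ (k : Nat) (num acc : Int), 0 ≤ num → (step - num).toNat = k →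
      pyAInner chars cn step num acc =
        acc + ((((ords chars).drop (cn + num).toNat).take k).sum) := by
  intro k
  induction k with
  | zero =>
    intro num acc h0 hk
    rw [pyAInner, dif_neg (by omega)]
    simp
  | succ k ih =>
    intro num acc h0 hk
    have hnum : num < step := by omega
    rw [pyAInner, dif_pos hnum]
    have hidx : (cn + num).toNat < chars.length := by omega
    rw [PySem.List.pyGet?_eq_some_getElem chars (by omega) (by omega)]
    rw [ih (num + 1) _ (by omega) (by omega)]
    have hidx' : (cn + num).toNat < (ords chars).length := by rw [ords_length]; omega
    have hdropc : (ords chars).drop (cn + num).toNat =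
        (ords chars)[(cn + num).toNat] :: (ords chars).drop ((cn + num).toNat + 1) :=
      (List.getElem_cons_drop hidx').symm
    rw [hdropc]
    have hsucc : (cn + (num + 1)).toNat = (cn + num).toNat + 1 := by omega
    rw [hsucc]
    simp [ords, List.getElem_map]
    ring

-- A's outer loop produces the chunk sums from currentNum on (appended to out)
theorem pyAOuter_eq (chars : List Char) (step : Int) (hstep : 1 ≤ step) :
    ∀ (m : Nat) (cn : Int) (out : List Int), 0 ≤ cn →
      (((chars.length : Int) - cn).toNat = m) →
      pyAOuter chars step hstep cn out =
        out ++ chunkSums step.toNat ((ords chars).drop cn.toNat) := by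
  intro m
  induction m using Nat.strong_induction_on with
  | _ m IH =>
    intro cn out hcn hm
    by_cases hb : cn + step ≤ (chars.length : Int)
    · rw [pyAOuter, dif_pos hb]
      rw [IH (((chars.length : Int) - (cn + step)).toNat) (by omega) (cn + step) _
        (by omega) rfl]
      rw [pyAInner_eq chars cn step hcn hb step.toNat 0 0 (by omega) (by omega)]
      rw [List.append_assoc]
      have hpos : 0 < step.toNat ∧ step.toNat ≤ ((ords chars).drop cn.toNat).length := by
        constructor
        · omega
        · rw [List.length_drop, ords_length]; omega
      conv_rhs => rw [chunkSums]
      rw [dif_pos hpos]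
      have h1 : (cn + 0).toNat = cn.toNat := by omega
      have h2 : ((ords chars).drop cn.toNat).drop step.toNat =
          (ords chars).drop (cn + step).toNat := by
        rw [List.drop_drop]; congr 1; omega
      rw [h1, h2]
      simp
    · rw [pyAOuter, dif_neg hb]
      rw [chunkSums, dif_neg (by
        intro hcon
        rw [List.length_drop, ords_length] at hcon
        omega)]
      simp

-- ===== VERDICT (by name: the statement is the Claim_ definition above) =====
theorem SplittingMessageIntoASC_py_spec : Claim_equal_SplittingMessageIntoASC_py := by
  intro message _
  unfold Spec_SplittingMessageIntoASC_py
  set s := StepGenUid_py (PySem.Str.len message) with hs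
  have hs1 : 1 ≤ s := one_le_StepGenUid_py _
  have hst : s = ((s.toNat : Nat) : Int) := by omega
  have hA : SplittingMessageIntoASC_py message =
      pyAOuter message.toList s (one_le_StepGenUid_py _) 0 [] := rfl
  have hB : SplittingMessageIntoASC_py_alt message = altLoop s 0 0 message.toList := rfl
  rw [hA, hB]
  rw [pyAOuter_eq message.toList s hs1 (((message.toList.length : Int) - 0).toNat) 0 []
    (by omega) rfl]
  rw [altLoop_eq_chunkSums s s.toNat hst (by omega) message.toList.length message.toList
    rfl 0 (by simp)]
  simp
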